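-- pv_equiv track=rewrite | github.com/dohung0770/advent-of-code-2024 | 2015/day1/main.py | part1
-- ===== SOURCE A (Python) =====
-- def part1(instructions: str) -> int:
--     '''
--     Given an instruction to traverse between floors. with ( means go up, ) means go down.
--     Return the final floor the Santa would be at.
--
--     Parameters:
--         instructions (str): list of instructions, is either ( or )
--
--     Returns:
--         output (int): the floor the Santa would be at.
--     '''
--
--     curr_floor = 0
--     for char in instructions:
--         if char == '(':
--             curr_floor += 1
--         else:
--             curr_floor -= 1
--
--     return curr_floor
-- ===== SOURCE B (Python) =====
-- def part1(instructions: str) -> int: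
--     ups = instructions.count('(')
--     return 2 * ups - len(instructions)
-- ===== Notes on version B (the rewrite author's own statement) =====
-- stated objective: faster
-- what changed: Replaces the per-character branch-and-accumulate loop with a counting closed form: net floor = 2*count of up-characters - len, since each up-character adds 1 and every other character subtracts 1.
import Mathlib
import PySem

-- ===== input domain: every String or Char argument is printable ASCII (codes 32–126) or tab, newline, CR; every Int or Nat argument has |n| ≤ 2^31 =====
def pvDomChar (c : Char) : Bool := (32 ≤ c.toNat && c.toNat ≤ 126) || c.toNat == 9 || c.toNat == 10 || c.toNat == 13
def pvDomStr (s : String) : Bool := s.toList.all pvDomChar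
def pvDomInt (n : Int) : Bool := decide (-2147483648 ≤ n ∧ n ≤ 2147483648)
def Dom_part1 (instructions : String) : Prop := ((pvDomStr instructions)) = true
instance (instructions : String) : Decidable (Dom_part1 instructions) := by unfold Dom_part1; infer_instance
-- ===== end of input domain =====

-- B replaces A's per-character loop with the closed form 2*count('(') - len (constant-factor faster: C-level count instead of a Python-level loop).

-- ===== PORT A =====
def part1 (instructions : String) : Int :=
  instructions.toList.foldl (fun curr_floor char => if char == '(' then curr_floor + 1 else curr_floor - 1) 0

-- ===== PORT B =====
def part1_alt (instructions : String) : Int :=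
  2 * (PySem.Str.count instructions "(" : Int) - (PySem.Str.len instructions : Int)

-- ===== PRECONDITION & SPEC =====
def Spec_part1 (instructions : String) (out : Int) : Prop := out = part1_alt instructions
instance (instructions : String) (out : Int) : Decidable (Spec_part1 instructions out) := by unfold Spec_part1; infer_instance

-- ===== CLAIM (what is proved, stated in full; the proofs are below) =====
def Claim_equal_part1 : Prop := ∀ (instructions : String), Dom_part1 instructions → Spec_part1 instructions (part1 instructions)

-- ===== LEMMAS AND PROOFS =====

-- substring-count with a singleton needle equals the character count
theorem count_go_singleton (c : Char) (l : List Char) (acc : Nat) :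
    PySem.Chars.count.go [c] l.length l acc = acc + l.count c := by
  induction l generalizing acc with
  | nil => simp [PySem.Chars.count.go]
  | cons h t ih =>
    simp only [List.length_cons, PySem.Chars.count.go, List.isPrefixOf, List.count_cons]
    by_cases hc : h = c
    · simp [hc, ih]; omega
    · simp [hc, Ne.symm hc, ih]

theorem chars_count_singleton (c : Char) (l : List Char) :
    PySem.Chars.count l [c] = l.count c := by
  simpa [PySem.Chars.count] using count_go_singleton c l 0

-- A's loop computed in closed form
theorem foldl_closed (l : List Char) (acc : Int) :
    l.foldl (fun curr_floor char => if char == '(' then curr_floor + 1 else curr_floor - 1) acc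
      = acc + 2 * (l.count '(' : Int) - (l.length : Int) := by
  induction l generalizing acc with
  | nil => simp
  | cons h t ih =>
    simp only [List.foldl_cons, List.count_cons, List.length_cons]
    by_cases hc : h = '('
    · rw [if_pos (by simp [hc]), ih]; simp [hc]; ring
    · rw [if_neg (by simp [hc]), ih]; simp [hc]; ring

-- ===== VERDICT (by name: the statement is the Claim_ definition above) =====
theorem part1_spec : Claim_equal_part1 := by
  intro s _
  unfold Spec_part1 part1 part1_alt
  rw [foldl_closed, PySem.Str.count_eq]
  have h1 : "(".toList = ['('] := rfl
  rw [h1, chars_count_singleton]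
  simp [PySem.Str.len_eq, PySem.Chars.len]
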